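-- pv_equiv track=rewrite | github.com/sammy0329/DataStructures_Study | ryan/230208_study/백준_1072_게임.py | solution
-- ===== SOURCE A (Python) =====
-- def calculate(x, y, more=0):
--     z = int(100*(y+more)/(x+more))
--     return z
--
-- def solution(x, y):
--     z = calculate(x, y)
--
--     if z >= 99: return -1
--
--     lo, hi = 0, x
--     while True:
--         mid = (lo + hi)//2
--         stat = calculate(x, y, more=mid)
--         if stat > z + 1: hi = mid
--         elif stat == z: lo = mid
--         else:
--             hi = mid
--             break
--         if lo + 1 == hi:
--             return hi
--
--     while True:
--         mid = (lo + hi)//2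
--         if lo + 1 == hi:
--             return hi
--
--         if calculate(x, y, mid) == z: lo = mid
--         else: hi = mid
-- ===== SOURCE B (Python) =====
-- def solution(x, y):
--     z = 100 * y // x
--     if z >= 99:
--         return -1
--     need = (z + 1) * x - 100 * y
--     return -(-need // (99 - z))
-- ===== Notes on version B (the rewrite author's own statement) =====
-- stated objective: faster
-- what changed: Replaced the two binary-search loops over calculate() by a closed-form ceiling division solving 100*(y+m) >= (z+1)*(x+m); Pre_ restricts to the problem's natural domain (x > 0 with y >= 0, plus the immediate-return winrate >= 99 inputs), excluding x = 0 / other x < 0 where A raises or loops forever, and negative y with x > 0 where A's float truncation toward zero is an accident outside the problem's domain.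
-- outside the precondition, e.g. on solution(101, -1): A returns 3, B returns 1; on solution(0, 5): A raises ZeroDivisionError, B raises ZeroDivisionError
import Mathlib
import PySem

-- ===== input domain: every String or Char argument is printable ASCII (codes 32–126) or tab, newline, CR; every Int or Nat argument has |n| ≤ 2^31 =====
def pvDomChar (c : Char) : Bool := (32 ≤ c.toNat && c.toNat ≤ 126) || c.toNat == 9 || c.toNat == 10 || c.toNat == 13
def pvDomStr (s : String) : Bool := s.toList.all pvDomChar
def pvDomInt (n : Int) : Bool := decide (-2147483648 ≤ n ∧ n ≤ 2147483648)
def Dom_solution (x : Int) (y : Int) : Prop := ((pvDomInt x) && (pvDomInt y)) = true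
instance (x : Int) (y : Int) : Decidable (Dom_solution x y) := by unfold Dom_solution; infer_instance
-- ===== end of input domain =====

-- B replaces A's two binary-search loops by one closed-form ceiling division (faster: O(1)
-- arithmetic instead of O(log x) loop iterations).

-- ===== PORT A =====
-- calculate: int(100*(y+more)/(x+more)).  On the admitted domain (|values| ≤ 2^31) the float
-- division is exact enough that int(...) equals truncated integer division (the numerator,
-- < 2^40, is exact in a double and the quotient's rounding error is < 1/denominator), so it
-- is ported as Int.tdiv.  Division by zero (ZeroDivisionError) never occurs inside Pre_.
def calcA (x : Int) (y : Int) (more : Int) : Int := (100 * (y + more)).tdiv (x + more)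

-- second `while True` loop of A (fuel bounds the iteration count; each iteration strictly
-- shrinks hi-lo, so the fuel x+1 chosen by `solution` is never exhausted inside Pre_)
def loopB (x : Int) (y : Int) (z : Int) : Nat → Int → Int → Int
  | 0, _, _ => 0
  | f + 1, lo, hi =>
    let mid := PySem.Int.floordiv (lo + hi) 2
    if lo + 1 = hi then hi
    else if calcA x y mid = z then loopB x y z f mid hi
    else loopB x y z f lo mid

-- first `while True` loop of A; the `break` transfers to loopB with hi := mid
def loopA (x : Int) (y : Int) (z : Int) : Nat → Int → Int → Int
  | 0, _, _ => 0
  | f + 1, lo, hi =>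
    let mid := PySem.Int.floordiv (lo + hi) 2
    let stat := calcA x y mid
    if stat > z + 1 then (if lo + 1 = mid then mid else loopA x y z f lo mid)
    else if stat = z then (if mid + 1 = hi then hi else loopA x y z f mid hi)
    else loopB x y z f lo mid

def solution (x : Int) (y : Int) : Int :=
  let z := calcA x y 0
  if z ≥ 99 then -1
  else loopA x y z (x.toNat + 1) 0 x

-- ===== PORT B =====
def solution_alt (x : Int) (y : Int) : Int :=
  let z := PySem.Int.floordiv (100 * y) x
  if z ≥ 99 then -1
  else
    let need := (z + 1) * x - 100 * y;
    -(PySem.Int.floordiv (-need) (99 - z))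

-- ===== PRECONDITION & SPEC =====
-- Pre_ restricts to the problem's natural domain plus the inputs where both stop at once:
-- it excludes x = 0 (A raises ZeroDivisionError), x < 0 with winrate below 99 (A loops
-- forever or hits a zero denominator mid-search), and negative y with x > 0 (a negative
-- win count is outside the problem's domain; A's float truncation toward zero differs from
-- floor division there).
def Pre_solution (x : Int) (y : Int) : Prop :=
  (0 < x ∧ 0 ≤ y) ∨ (x < 0 ∧ 99 ≤ (100 * y).tdiv x)
instance (x : Int) (y : Int) : Decidable (Pre_solution x y) := by unfold Pre_solution; infer_instance
def pvWitness_solution : Int × Int := (7, 3)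

def Spec_solution (x : Int) (y : Int) (out : Int) : Prop := out = solution_alt x y
instance (x : Int) (y : Int) (out : Int) : Decidable (Spec_solution x y out) := by unfold Spec_solution; infer_instance

-- ===== CLAIM (what is proved, stated in full; the proofs are below) =====
def Claim_equal_solution : Prop := ∀ (x : Int) (y : Int), Dom_solution x y → Pre_solution x y → Spec_solution x y (solution x y)

-- ===== LEMMAS AND PROOFS =====

-- truncated-division bracket, positive divisor, positive bound
lemma tdiv_ge_pos {a b k : Int} (hb : 0 < b) (hk : 1 ≤ k) : k ≤ a.tdiv b ↔ k * b ≤ a := by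
  rcases (le_or_gt 0 a : 0 ≤ a ∨ 0 > a) with ha | ha
  · rw [Int.tdiv_eq_ediv_of_nonneg ha, Int.le_ediv_iff_mul_le hb]
  · constructor
    · intro h
      exfalso
      have hrw : a.tdiv b = -((-a).tdiv b) := by rw [← Int.neg_tdiv, neg_neg]
      have h0 : 0 ≤ (-a).tdiv b := by
        rw [Int.tdiv_eq_ediv_of_nonneg (by omega)]
        exact Int.ediv_nonneg (by omega) hb.le
      omega
    · intro h
      exfalso
      nlinarith

-- the closed-form value of B's else-branch
def mstarF (x : Int) (y : Int) (z : Int) : Int :=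
  -(PySem.Int.floordiv (-((z + 1) * x - 100 * y)) (99 - z))

-- stat(m) ≥ z for every m ≥ 0 (0 ≤ z ≤ 98, z the integer winrate)
lemma stat_ge {x y z m : Int} (hx : 0 < x) (hzdef : z = (100 * y).tdiv x) (hz0 : 0 ≤ z)
    (hz : z ≤ 98) (hy : 0 ≤ y) (hm : 0 ≤ m) : z ≤ calcA x y m := by
  have hxm : 0 < x + m := by omega
  have hself : z ≤ (100 * y).tdiv x := le_of_eq hzdef
  rcases (le_or_gt 1 z : 1 ≤ z ∨ 1 > z) with h1 | h1
  · have h0 := (tdiv_ge_pos hx h1).mp hself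
    rw [calcA, tdiv_ge_pos hxm h1]
    nlinarith
  · have hzz : z = 0 := by omega
    rw [calcA, hzz, Int.tdiv_eq_ediv_of_nonneg (by omega)]
    exact Int.ediv_nonneg (by omega) hxm.le

-- the threshold: stat(m) ≥ z+1 iff m ≥ mstarF
lemma calc_ge_iff {x y z : Int} (hx : 0 < x) (hz0 : 0 ≤ z) (hz : z ≤ 98)
    {m : Int} (hm : 0 ≤ m) : (z + 1 ≤ calcA x y m ↔ mstarF x y z ≤ m) := by
  have hxm : 0 < x + m := by omega
  have hden : 0 < 99 - z := by omega
  rw [calcA, tdiv_ge_pos hxm (by omega), mstarF]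
  rw [neg_le, PySem.Int.le_floordiv_iff_mul_le hden]
  constructor <;> intro h <;> nlinarith

lemma mstar_pos {x y z : Int} (hx : 0 < x) (hzdef : z = (100 * y).tdiv x) (hz0 : 0 ≤ z)
    (hz : z ≤ 98) : 1 ≤ mstarF x y z := by
  have h0 : calcA x y 0 = z := by simp [calcA, hzdef]
  have := calc_ge_iff (x := x) (y := y) hx hz0 hz (le_refl 0)
  rw [h0] at this
  omega

lemma mstar_le {x y z : Int} (hx : 0 < x) (hzdef : z = (100 * y).tdiv x) (hz0 : 0 ≤ z)
    (hz : z ≤ 98) (hy : 0 ≤ y) : mstarF x y z ≤ x := by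
  rw [← calc_ge_iff hx hz0 hz hx.le]
  have hxx : 0 < x + x := by omega
  have hself : z ≤ (100 * y).tdiv x := le_of_eq hzdef
  rw [calcA, tdiv_ge_pos hxx (by omega)]
  rcases (le_or_gt 1 z : 1 ≤ z ∨ 1 > z) with h1 | h1
  · have h0 := (tdiv_ge_pos hx h1).mp hself
    nlinarith
  · have hzz : z = 0 := by omega
    nlinarith

lemma loopB_correct {x y z : Int} (hx : 0 < x) (hzdef : z = (100 * y).tdiv x) (hz0 : 0 ≤ z)
    (hz : z ≤ 98) (hy : 0 ≤ y) :
    ∀ (f : Nat) (lo hi : Int), 0 ≤ lo → lo < mstarF x y z → mstarF x y z ≤ hi →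
      hi - lo ≤ (f : Int) → loopB x y z f lo hi = mstarF x y z := by
  intro f
  induction f with
  | zero => intro lo hi _ h1 h2 h3; exfalso; omega
  | succ f ih =>
    intro lo hi hlo h1 h2 h3
    rw [loopB]
    have hmid : PySem.Int.floordiv (lo + hi) 2 = (lo + hi) / 2 :=
      PySem.Int.floordiv_eq_ediv_of_pos (by omega)
    by_cases hret : lo + 1 = hi
    · rw [if_pos hret]; omega
    · rw [if_neg hret]
      by_cases hstat : calcA x y (PySem.Int.floordiv (lo + hi) 2) = z
      · -- stat = z : mid is below the threshold
        have hlt : PySem.Int.floordiv (lo + hi) 2 < mstarF x y z := by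
          by_contra hcon
          push Not at hcon
          have := (calc_ge_iff hx hz0 hz (by rw [hmid]; omega)).mpr hcon
          omega
        rw [if_pos hstat]
        exact ih _ _ (by rw [hmid] at *; omega) hlt h2 (by rw [hmid] at *; omega)
      · -- stat ≠ z, and stat ≥ z always, so stat ≥ z+1 : mid at or above the threshold
        have hge0 : z ≤ calcA x y (PySem.Int.floordiv (lo + hi) 2) :=
          stat_ge hx hzdef hz0 hz hy (by rw [hmid]; omega)
        have hge : mstarF x y z ≤ PySem.Int.floordiv (lo + hi) 2 :=
          (calc_ge_iff hx hz0 hz (by rw [hmid]; omega)).mp (by omega)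
        rw [if_neg hstat]
        exact ih _ _ hlo h1 hge (by rw [hmid] at *; omega)

lemma loopA_correct {x y z : Int} (hx : 0 < x) (hzdef : z = (100 * y).tdiv x) (hz0 : 0 ≤ z)
    (hz : z ≤ 98) (hy : 0 ≤ y) :
    ∀ (f : Nat) (lo hi : Int), 0 ≤ lo → lo < mstarF x y z → mstarF x y z ≤ hi →
      hi - lo ≤ (f : Int) → loopA x y z f lo hi = mstarF x y z := by
  intro f
  induction f with
  | zero => intro lo hi _ h1 h2 h3; exfalso; omega
  | succ f ih =>
    intro lo hi hlo h1 h2 h3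
    rw [loopA]
    have hmid : PySem.Int.floordiv (lo + hi) 2 = (lo + hi) / 2 :=
      PySem.Int.floordiv_eq_ediv_of_pos (by omega)
    have hmemb : 0 ≤ PySem.Int.floordiv (lo + hi) 2 := by rw [hmid]; omega
    have hge0 : z ≤ calcA x y (PySem.Int.floordiv (lo + hi) 2) :=
      stat_ge hx hzdef hz0 hz hy hmemb
    by_cases hgt : calcA x y (PySem.Int.floordiv (lo + hi) 2) > z + 1
    · -- stat > z+1 : mid at or above threshold, hi := mid
      have hge : mstarF x y z ≤ PySem.Int.floordiv (lo + hi) 2 :=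
        (calc_ge_iff hx hz0 hz hmemb).mp (by omega)
      rw [if_pos hgt]
      by_cases hret : lo + 1 = PySem.Int.floordiv (lo + hi) 2
      · rw [if_pos hret]; omega
      · rw [if_neg hret]
        exact ih _ _ hlo h1 hge (by rw [hmid] at *; omega)
    · rw [if_neg hgt]
      by_cases hstat : calcA x y (PySem.Int.floordiv (lo + hi) 2) = z
      · -- stat = z : mid below threshold, lo := mid
        have hlt : PySem.Int.floordiv (lo + hi) 2 < mstarF x y z := by
          by_contra hcon
          push Not at hcon
          have := (calc_ge_iff hx hz0 hz hmemb).mpr hcon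
          omega
        rw [if_pos hstat]
        by_cases hret : PySem.Int.floordiv (lo + hi) 2 + 1 = hi
        · rw [if_pos hret]; omega
        · rw [if_neg hret]
          exact ih _ _ (by omega) hlt h2 (by rw [hmid] at *; omega)
      · -- break : stat = z+1, hi := mid, continue in loopB
        have hge : mstarF x y z ≤ PySem.Int.floordiv (lo + hi) 2 :=
          (calc_ge_iff hx hz0 hz hmemb).mp (by omega)
        rw [if_neg hstat]
        exact loopB_correct hx hzdef hz0 hz hy _ _ _ hlo h1 hge (by rw [hmid] at *; omega)

-- for x > 0, 0 ≤ y, A's trunc winrate equals B's floor winrate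
lemma tdiv_eq_floordiv_of_pos {a b : Int} (hb : 0 < b) (ha : 0 ≤ a) :
    a.tdiv b = PySem.Int.floordiv a b := by
  rw [Int.tdiv_eq_ediv_of_nonneg ha, PySem.Int.floordiv_eq_ediv_of_pos hb]

-- ===== VERDICT (by name: the statement is the Claim_ definition above) =====
theorem solution_spec : Claim_equal_solution := by
  intro x y _ hpre
  unfold Spec_solution
  rcases hpre with ⟨hx, hy⟩ | ⟨hx, hq⟩
  · have hzeq : calcA x y 0 = PySem.Int.floordiv (100 * y) x := by
      simpa [calcA] using tdiv_eq_floordiv_of_pos hx (by omega : (0:Int) ≤ 100 * y)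
    have hz0 : 0 ≤ calcA x y 0 := by
      rw [calcA]
      simp only [add_zero]
      rw [Int.tdiv_eq_ediv_of_nonneg (by omega : (0:Int) ≤ 100 * y)]
      exact Int.ediv_nonneg (by omega) hx.le
    by_cases h99 : 99 ≤ calcA x y 0
    · simp [solution, solution_alt, ← hzeq, h99]
    · have hz : calcA x y 0 ≤ 98 := by omega
      have hzdef : calcA x y 0 = (100 * y).tdiv x := by simp [calcA]
      simp only [solution, solution_alt, ge_iff_le, ← hzeq, if_neg h99]
      rw [show -(PySem.Int.floordiv (-((calcA x y 0 + 1) * x - 100 * y)) (99 - calcA x y 0))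
            = mstarF x y (calcA x y 0) from rfl]
      exact loopA_correct hx hzdef hz0 hz hy _ 0 x (le_refl 0)
        (by have := mstar_pos hx hzdef hz0 hz; omega)
        (mstar_le hx hzdef hz0 hz hy)
        (by omega)
  · -- x < 0 with winrate ≥ 99: both return -1 at once
    have hmul : 100 * y ≤ 99 * x := by
      have hrw : (100 * y).tdiv x = (-(100 * y)).tdiv (-x) := by
        rw [Int.tdiv_neg, Int.neg_tdiv, neg_neg]
      rw [hrw] at hq
      have := (tdiv_ge_pos (a := -(100 * y)) (b := -x) (by omega) (by norm_num)).mp hq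
      nlinarith
    have hA : calcA x y 0 ≥ 99 := by
      simpa [calcA] using hq
    have hB : 99 ≤ PySem.Int.floordiv (100 * y) x := by
      rw [show PySem.Int.floordiv (100 * y) x = PySem.Int.floordiv (-(100 * y)) (-x) from
        (PySem.Int.floordiv_neg_neg _ _).symm]
      rw [PySem.Int.le_floordiv_iff_mul_le (by omega)]
      nlinarith
    simp [solution, solution_alt, hA, hB]
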